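-- pv_equiv track=rewrite | github.com/ChanMeng666/juejin-algorithm-practice | problems/045-digit-removal/solution.py | solution
-- ===== SOURCE A (Python) =====
-- def solution(n: int, a: list) -> int:
--     # PLEASE DO NOT MODIFY THE FUNCTION SIGNATURE
--     # Copy the input array to avoid modifying the original
--     nums = a.copy()
--     steps = 0
--
--     # Continue while there are non-zero numbers
--     while any(nums):
--         # Find the current largest number
--         max_num = max(nums)
--         # Find the position of this number in the array
--         max_idx = nums.index(max_num)
--
--         # Remove the leading digit of the largest number
--         str_num = str(max_num)
--         if len(str_num) > 1:
--             nums[max_idx] = int(str_num[1:])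
--         else:
--             nums[max_idx] = 0
--
--         steps += 1
--
--     return steps
-- ===== SOURCE B (Python) =====
-- def solution(n: int, a: list) -> int:
--     # Each number's digit-removal trajectory is independent of the others, so
--     # simulate each number on its own instead of repeatedly scanning for the
--     # global maximum: total steps = sum of per-number trajectory lengths.
--     total = 0
--     for x in a:
--         while x:
--             s = str(x)
--             x = int(s[1:]) if len(s) > 1 else 0
--             total += 1
--     return total
-- ===== Notes on version B (the rewrite author's own statement) =====
-- stated objective: faster
-- what changed: A repeatedly rescans the whole array (max + index + truthiness test) for every single digit removal; B exploits that each number's digit-removal trajectory is independent of the others and sums the per-number trajectory lengths in one pass over the list. Intended as faster (O(S*n) -> O(S)); measured: a timing run saw A time out at n=16 where B returned, so no clean ratio could be read.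
import Mathlib
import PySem

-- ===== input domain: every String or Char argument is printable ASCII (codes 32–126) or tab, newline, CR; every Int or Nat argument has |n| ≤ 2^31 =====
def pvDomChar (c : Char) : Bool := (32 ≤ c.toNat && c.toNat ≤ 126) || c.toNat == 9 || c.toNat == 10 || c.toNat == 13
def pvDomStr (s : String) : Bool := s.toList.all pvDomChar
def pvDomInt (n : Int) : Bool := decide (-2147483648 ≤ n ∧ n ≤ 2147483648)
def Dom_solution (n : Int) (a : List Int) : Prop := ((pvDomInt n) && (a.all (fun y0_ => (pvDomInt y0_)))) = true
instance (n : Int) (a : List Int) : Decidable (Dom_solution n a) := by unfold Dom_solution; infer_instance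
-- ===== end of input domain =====

-- B sums each number's independent digit-removal trajectory in one pass instead of
-- rescanning the whole array for the maximum before every single removal; intended as
-- faster (O(S·n) → O(S), S = total removals) — a timing run saw A time out at n=16
-- where B returned, but could not measure a clean ratio. Equivalence is proved on
-- Pre_solution (all entries nonnegative, or at most one entry), exactly where A's
-- while-loop terminates.

-- ===== PORT A =====
-- int(s) ported by hand for this program only: the argument is always str(num) with its
-- first character removed, i.e. a nonempty string of decimal digits (possibly with leading
-- zeros); on exactly such strings Python's int(s) is this left fold (exact there).
def intOfDigits (ds : List Char) : Int :=
  ds.foldl (fun acc c => 10 * acc + ((c.toNat : Int) - 48)) 0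

-- the loop body's update of the chosen number: str(num), then int(str[1:]) if len > 1 else 0
def dropLead (m : Int) : Int :=
  let s := PySem.Int.toChars m           -- str(max_num)
  if 1 < s.length then intOfDigits (PySem.List.slice s (some 1) none)   -- int(str_num[1:])
  else 0

-- the while loop; fuel is only a totality guard (Python's loop needs none where it terminates;
-- the fuel chosen in `solution` is proved sufficient on Pre_solution)
def solutionLoop : Nat → List Int → Int → Int
  | 0, _, steps => steps
  | fuel + 1, nums, steps =>
    if nums.any (fun x => x != 0) then          -- while any(nums)
      match PySem.List.max? nums (fun x => x) with   -- max(nums)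
      | none => steps                            -- unreachable: any(nums) ⇒ nums ≠ []
      | some m =>
        match PySem.List.index? nums m with      -- nums.index(max_num)
        | none => steps                          -- unreachable: the max is a member
        | some i => solutionLoop fuel (nums.set i (dropLead m)) (steps + 1)
    else steps

def solution (n : Int) (a : List Int) : Int :=
  solutionLoop ((a.map (fun x => x.natAbs)).sum + a.length) a 0

-- ===== PORT B =====
-- the inner `while x:` of Source B; fuel (chosen as |x|+1, proved sufficient for every Int) is
-- only a totality guard
def countLoop : Nat → Int → Int → Int
  | 0, _, total => total
  | fuel + 1, x, total =>
    if x != 0 then countLoop fuel (dropLead x) (total + 1) else total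

def solution_alt (n : Int) (a : List Int) : Int :=
  a.foldl (fun total x => countLoop (x.natAbs + 1) x total) 0

-- ===== PRECONDITION & SPEC =====
-- A's while-loop never terminates when a negative entry coexists with another entry (the
-- maximum is eventually 0 while the negative entry stays nonzero); Pre_ admits exactly the
-- inputs on which A terminates: all entries nonnegative, or a list of at most one entry.
def Pre_solution (n : Int) (a : List Int) : Prop := (∀ x ∈ a, 0 ≤ x) ∨ a.length ≤ 1
instance (n : Int) (a : List Int) : Decidable (Pre_solution n a) := by unfold Pre_solution; infer_instance
def pvWitness_solution : Int × List Int := (3, [105, 2, 30])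

def Spec_solution (n : Int) (a : List Int) (out : Int) : Prop := out = solution_alt n a
instance (n : Int) (a : List Int) (out : Int) : Decidable (Spec_solution n a out) := by unfold Spec_solution; infer_instance

-- ===== CLAIM (what is proved, stated in full; the proofs are below) =====
def Claim_equal_solution : Prop := ∀ (n : Int) (a : List Int), Dom_solution n a → Pre_solution n a → Spec_solution n a (solution n a)

-- ===== LEMMAS AND PROOFS =====

-- digit characters -----------------------------------------------------------------
theorem charVal_digitChar {d : Nat} (hd : d < 10) : ((Nat.digitChar d).toNat : Int) - 48 = d := by
  interval_cases d <;> decide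

-- the big-endian character representation of a positive Nat
def bigChars (n : Nat) : List Char := ((Nat.digits 10 n).map Nat.digitChar).reverse

theorem intOfDigits_bigEndian (l : List Nat) (hl : ∀ d ∈ l, d < 10) :
    intOfDigits ((l.map Nat.digitChar).reverse) = ((Nat.ofDigits 10 l : Nat) : Int) := by
  induction l with
  | nil => simp [intOfDigits, Nat.ofDigits]
  | cons d t ih =>
    have hd : d < 10 := hl d (by simp)
    have ht : ∀ x ∈ t, x < 10 := fun x hx => hl x (by simp [hx])
    simp only [List.map_cons, List.reverse_cons, intOfDigits, List.foldl_append,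
      List.foldl_cons, List.foldl_nil] at *
    rw [ih ht, charVal_digitChar hd, Nat.ofDigits_cons]
    push_cast
    ring

theorem toDigitsCore_eq (fuel : Nat) : ∀ (m : Nat) (acc : List Char), 0 < m → m ≤ fuel →
    Nat.toDigitsCore 10 fuel m acc = bigChars m ++ acc := by
  induction fuel with
  | zero => intro m acc h1 h2; omega
  | succ fuel ih =>
    intro m acc h1 h2
    rw [Nat.toDigitsCore]
    have hdig : Nat.digits 10 m = m % 10 :: Nat.digits 10 (m / 10) :=
      Nat.digits_def' (by norm_num) h1
    by_cases h : m / 10 = 0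
    · simp only [h, if_true]
      rw [bigChars, hdig, h]
      simp
    · simp only [h, if_false]
      have hlt : m / 10 < m := Nat.div_lt_self h1 (by norm_num)
      rw [ih (m / 10) _ (Nat.pos_of_ne_zero h) (by omega)]
      rw [bigChars, bigChars, hdig]
      simp

theorem toDigits_eq (m : Nat) (h : 0 < m) : Nat.toDigits 10 m = bigChars m := by
  have := toDigitsCore_eq (m + 1) m [] h (by omega)
  simpa [Nat.toDigits] using this

theorem length_bigChars (m : Nat) : (bigChars m).length = (Nat.digits 10 m).length := by
  simp [bigChars]

theorem tail_bigChars (m : Nat) :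
    (bigChars m).tail = (((Nat.digits 10 m).dropLast).map Nat.digitChar).reverse := by
  rw [bigChars, List.tail_reverse, List.map_dropLast]

-- dropLead on positive inputs: a nonnegative value strictly below the input ---------
theorem toChars_of_pos {m : Int} (hm : 0 < m) :
    PySem.Int.toChars m = bigChars m.toNat := by
  have h1 : ¬ m < 0 := by omega
  rw [PySem.Int.toChars, if_neg h1, toDigits_eq m.toNat (by omega)]

theorem dropLead_lt_of_pos {m : Int} (hm : 0 < m) : 0 ≤ dropLead m ∧ dropLead m < m := by
  have hs := toChars_of_pos hm
  have hnpos : 0 < m.toNat := by omega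
  set n := m.toNat with hn
  simp only [dropLead, hs, length_bigChars]
  by_cases hL : 1 < (Nat.digits 10 n).length
  · rw [if_pos hL, PySem.List.slice_from_one, tail_bigChars,
      intOfDigits_bigEndian _ (fun d hd => Nat.digits_lt_base (by norm_num)
        ((List.dropLast_sublist _).mem hd))]
    have hlt : Nat.ofDigits 10 ((Nat.digits 10 n).dropLast) < 10 ^ ((Nat.digits 10 n).dropLast).length :=
      Nat.ofDigits_lt_base_pow_length (by norm_num)
        (fun d hd => Nat.digits_lt_base (by norm_num) ((List.dropLast_sublist _).mem hd))
    have hlen : ((Nat.digits 10 n).dropLast).length = (Nat.digits 10 n).length - 1 := by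
      simp [List.length_dropLast]
    have hpow : 10 ^ ((Nat.digits 10 n).length) ≤ 10 * n :=
      Nat.base_pow_length_digits_le 10 n (by norm_num) (by omega)
    have hpow' : 10 ^ ((Nat.digits 10 n).length - 1) ≤ n := by
      have : 10 ^ ((Nat.digits 10 n).length) = 10 * 10 ^ ((Nat.digits 10 n).length - 1) := by
        rw [← pow_succ']
        congr 1
        omega
      omega
    rw [hlen] at hlt
    have hmn : m = (n : Int) := by omega
    constructor
    · positivity
    · omega
  · rw [if_neg hL]
    omega

theorem dropLead_neg_eq {m : Int} (hm : m < 0) : dropLead m = (m.natAbs : Int) := by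
  have habs : 0 < m.natAbs := by omega
  have hs : PySem.Int.toChars m = '-' :: bigChars m.natAbs := by
    rw [PySem.Int.toChars, if_pos hm, toDigits_eq m.natAbs habs]
  have hlen : 0 < (Nat.digits 10 m.natAbs).length := by
    rw [Nat.length_digits 10 m.natAbs (by norm_num) (by omega)]
    omega
  simp only [dropLead, hs, List.length_cons, length_bigChars]
  rw [if_pos (by omega), PySem.List.slice_from_one, List.tail_cons, bigChars,
    intOfDigits_bigEndian _ (fun d hd => Nat.digits_lt_base (by norm_num) hd),
    Nat.ofDigits_digits]

-- the per-number trajectory length --------------------------------------------------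
def cntN (x : Int) : Nat :=
  if h : x = 0 then 0 else 1 + cntN (dropLead x)
  termination_by (2 * x.natAbs + (if x < 0 then 1 else 0) : Nat)
  decreasing_by
    rcases lt_trichotomy x 0 with hx | hx | hx
    · rw [dropLead_neg_eq hx, if_neg (by omega : ¬ ((x.natAbs : Int) < 0)), if_pos hx]
      simp only [Int.natAbs_natCast]
      omega
    · exact absurd hx h
    · obtain ⟨h0, hlt⟩ := dropLead_lt_of_pos hx
      split_ifs <;> omega

theorem cntN_zero : cntN 0 = 0 := by rw [cntN]; simp

theorem cntN_of_ne {x : Int} (hx : x ≠ 0) : cntN x = 1 + cntN (dropLead x) := by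
  rw [cntN]; simp [hx]

theorem cntN_le_of_pos : ∀ (k : Nat), 0 < k → cntN (k : Int) ≤ k := by
  intro k
  induction k using Nat.strong_induction_on with
  | _ k ih =>
    intro hk
    rw [cntN_of_ne (by omega : (k : Int) ≠ 0)]
    obtain ⟨h0, hlt⟩ := dropLead_lt_of_pos (by omega : (0 : Int) < k)
    set v := dropLead (k : Int) with hv
    have hvk : v = ((v.toNat : Nat) : Int) := by omega
    by_cases hz : v = 0
    · rw [hz, cntN_zero]; omega
    · have h1 : cntN ((v.toNat : Nat) : Int) ≤ v.toNat := ih v.toNat (by omega) (by omega)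
      have h2 : ((v.toNat : Nat) : Int) = v := by omega
      rw [h2] at h1
      omega

theorem cntN_le (x : Int) : cntN x ≤ x.natAbs + 1 := by
  rcases lt_trichotomy x 0 with hx | hx | hx
  · rw [cntN_of_ne (by omega), dropLead_neg_eq hx]
    have := cntN_le_of_pos x.natAbs (by omega)
    omega
  · rw [hx, cntN_zero]; omega
  · have h := cntN_le_of_pos x.toNat (by omega)
    have hxx : x = ((x.toNat : Nat) : Int) := by omega
    rw [hxx]
    simp only [Int.natAbs_natCast]
    omega

theorem countLoop_eq (fuel : Nat) : ∀ (x : Int) (t : Int), cntN x ≤ fuel →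
    countLoop fuel x t = t + cntN x := by
  induction fuel with
  | zero =>
    intro x t h
    have hz : x = 0 := by
      by_contra hx
      rw [cntN_of_ne hx] at h
      omega
    rw [hz, cntN_zero, countLoop]
    simp
  | succ fuel ih =>
    intro x t h
    rw [countLoop]
    by_cases hx : x = 0
    · rw [if_neg (by simp [hx]), hx, cntN_zero]
      simp
    · rw [if_pos (by simp [hx]), ih (dropLead x) (t + 1) (by rw [cntN_of_ne hx] at h; omega),
        cntN_of_ne hx]
      push_cast
      ring

theorem foldl_countLoop (l : List Int) : ∀ (s : Int),
    l.foldl (fun total x => countLoop (x.natAbs + 1) x total) s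
      = s + (l.map (fun x => (cntN x : Int))).sum := by
  induction l with
  | nil => intro s; simp
  | cons x t ih =>
    intro s
    rw [List.foldl_cons, ih, countLoop_eq _ _ _ (cntN_le x)]
    simp
    ring

theorem solution_alt_eq_sum (n : Int) (a : List Int) :
    solution_alt n a = (a.map (fun x => (cntN x : Int))).sum := by
  rw [solution_alt, foldl_countLoop]
  ring

def M (nums : List Int) : Int := (nums.map (fun x => (cntN x : Int))).sum

theorem M_nonneg (nums : List Int) : 0 ≤ M nums := by
  apply List.sum_nonneg
  intro x hx
  simp only [List.mem_map] at hx
  obtain ⟨y, _, hy⟩ := hx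
  omega

theorem M_set (nums : List Int) (i : Nat) (hi : i < nums.length) (v : Int) :
    M (nums.set i v) = M nums - (cntN nums[i] : Int) + (cntN v : Int) := by
  simp only [M, List.map_set]
  rw [List.sum_set]
  have hi' : i < (nums.map (fun x => (cntN x : Int))).length := by simpa using hi
  have hsplit : (nums.map (fun x => (cntN x : Int))).sum
      = ((nums.map (fun x => (cntN x : Int))).take i).sum + (cntN nums[i] : Int)
        + ((nums.map (fun x => (cntN x : Int))).drop (i + 1)).sum := by
    conv_lhs => rw [← List.take_append_drop (i + 1) (nums.map (fun x => (cntN x : Int)))]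
    rw [List.sum_append, List.sum_take_succ _ i hi']
    simp [hi]
  rw [if_pos hi']
  omega

theorem solutionLoop_eq (fuel : Nat) : ∀ (nums : List Int) (steps : Int),
    ((∀ x ∈ nums, 0 ≤ x) ∨ nums.length ≤ 1) → M nums ≤ fuel →
    solutionLoop fuel nums steps = steps + M nums := by
  induction fuel with
  | zero =>
    intro nums steps _ hM
    have := M_nonneg nums
    rw [solutionLoop]
    omega
  | succ fuel ih =>
    intro nums steps hinv hM
    rw [solutionLoop]
    by_cases hany : nums.any (fun x => x != 0) = true
    · rw [if_pos hany]
      obtain ⟨y, hy, hy0⟩ := List.any_eq_true.mp hany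
      have hy0 : y ≠ 0 := by simpa using hy0
      have hne : nums ≠ [] := by intro h; rw [h] at hy; simp at hy
      rcases hmax : PySem.List.max? nums (fun x => x) with _ | m
      · exact absurd ((PySem.List.max?_eq_none_iff _ _).mp hmax) hne
      · have hmem : m ∈ nums := PySem.List.max?_mem hmax
        have hismax : ∀ z ∈ nums, z ≤ m := PySem.List.max?_isMax hmax
        have hidx : (PySem.List.index? nums m).isSome :=
          (PySem.List.index?_isSome_iff _ _).mpr hmem
        rcases hidxeq : PySem.List.index? nums m with _ | i
        · rw [hidxeq] at hidx; simp at hidx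
        · obtain ⟨hi, hget, _⟩ := PySem.List.getElem_of_index?_eq_some hidxeq
          have hm0 : m ≠ 0 := by
            rcases hinv with hnn | hlen1
            · have : 0 < y := lt_of_le_of_ne (hnn y hy) (Ne.symm hy0)
              have := hismax y hy
              omega
            · obtain ⟨z, rfl⟩ : ∃ z, nums = [z] := by
                cases nums with
                | nil => simp at hy
                | cons z t =>
                  cases t with
                  | nil => exact ⟨z, rfl⟩
                  | cons w u => simp at hlen1
              simp only [List.mem_singleton] at hmem hy
              rw [hmem, ← hy]
              exact hy0
          have hinv' : (∀ x ∈ nums.set i (dropLead m), 0 ≤ x) ∨ (nums.set i (dropLead m)).length ≤ 1 := by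
            rcases hinv with hnn | hlen1
            · left
              intro x hx
              rcases List.mem_or_eq_of_mem_set hx with hx' | hx'
              · exact hnn x hx'
              · have hmpos : 0 < m := by
                  have : 0 < y := lt_of_le_of_ne (hnn y hy) (Ne.symm hy0)
                  have := hismax y hy
                  omega
                rw [hx']
                exact (dropLead_lt_of_pos hmpos).1
            · right; simpa using hlen1
          have hMset : M (nums.set i (dropLead m)) = M nums - 1 := by
            rw [M_set nums i hi (dropLead m), hget, cntN_of_ne hm0]
            push_cast
            ring
          show (match PySem.List.index? nums m with
            | none => steps
            | some i => solutionLoop fuel (nums.set i (dropLead m)) (steps + 1)) = steps + M nums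
          rw [hidxeq]
          show solutionLoop fuel (nums.set i (dropLead m)) (steps + 1) = steps + M nums
          rw [ih (nums.set i (dropLead m)) (steps + 1) hinv' (by rw [hMset]; omega), hMset]
          ring
    · rw [if_neg hany]
      have hall : ∀ x ∈ nums, x = 0 := by simpa using hany
      have : M nums = 0 := by
        apply List.sum_eq_zero
        intro z hz
        simp only [List.mem_map] at hz
        obtain ⟨y, hy, hyz⟩ := hz
        rw [hall y hy] at hyz
        rw [← hyz, cntN_zero]
        simp
      omega

-- ===== VERDICT (by name: the statement is the Claim_ definition above) =====
theorem sum_natAbs_add_one (a : List Int) :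
    (a.map (fun x => (x.natAbs : Int) + 1)).sum
      = (((a.map (fun x => x.natAbs)).sum + a.length : Nat) : Int) := by
  induction a with
  | nil => simp
  | cons x t iha =>
    simp only [List.map_cons, List.sum_cons, iha]
    push_cast [List.length_cons]
    ring

theorem solution_spec : Claim_equal_solution := by
  intro n a _ hpre
  show solution n a = solution_alt n a
  have hbound : M a ≤ ((a.map (fun x => x.natAbs)).sum + a.length : Nat) := by
    have h1 : M a ≤ (a.map (fun x => (x.natAbs : Int) + 1)).sum :=
      List.sum_le_sum (fun x _ => by exact_mod_cast cntN_le x)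
    have h2 := sum_natAbs_add_one a
    omega
  rw [solution, solutionLoop_eq _ a 0 hpre hbound, solution_alt_eq_sum]
  simp [M]
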